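-- pv_equiv track=rewrite | github.com/YadaYuki/atcoder- | abc234/e4.py | get_arithmetic
-- ===== SOURCE A (Python) =====
-- def get_arithmetic(first,diff,n_digits):
--     cur = first
--     arithmetic_str = ""
--     for i in range(n_digits):
--         if cur < 0 or cur > 9:
--             return None
--         arithmetic_str += str(cur)
--         cur += diff
--     return arithmetic_str
-- ===== SOURCE B (Python) =====
-- def get_arithmetic(first, diff, n_digits):
--     if any(first + diff * i < 0 or first + diff * i > 9 for i in range(n_digits)):
--         return None
--     return ''.join(str(first + diff * i) for i in range(n_digits))
-- ===== Notes on version B (the rewrite author's own statement) =====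
-- stated objective: alternative
-- what changed: Replaces the running accumulator (cur += diff) and single early-return loop with closed-form terms first + diff*i, a separate short-circuiting any() validation pass, and a separate join pass.
import Mathlib
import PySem

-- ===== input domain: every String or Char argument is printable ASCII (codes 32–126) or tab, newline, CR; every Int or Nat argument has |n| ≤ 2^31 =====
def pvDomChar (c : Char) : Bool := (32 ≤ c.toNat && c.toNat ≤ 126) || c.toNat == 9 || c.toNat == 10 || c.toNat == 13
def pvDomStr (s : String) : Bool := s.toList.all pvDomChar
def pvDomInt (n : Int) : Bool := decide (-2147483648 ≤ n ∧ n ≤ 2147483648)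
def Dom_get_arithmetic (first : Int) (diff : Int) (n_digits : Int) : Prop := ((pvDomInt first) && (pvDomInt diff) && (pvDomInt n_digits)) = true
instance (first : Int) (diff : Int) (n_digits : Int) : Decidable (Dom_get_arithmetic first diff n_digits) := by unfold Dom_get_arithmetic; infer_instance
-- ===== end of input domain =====

-- B drops A's running accumulator: it builds the term list by the closed form first + diff*i,
-- validates in a separate pass, then joins (idiomatic; same cost).

-- ===== PORT A =====
-- A's loop over range(n_digits) with running state (cur, arithmetic_str) and early return None.
def get_arithmetic_go (diff : Int) (cur : Int) (acc : String) : Nat → Option String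
  | 0 => some acc
  | m + 1 =>
      if cur < 0 ∨ cur > 9 then none
      else get_arithmetic_go diff (cur + diff) (acc ++ PySem.Int.toStr cur) m

-- range(n_digits) is iterated lazily with an early return, so the loop is a countdown
-- over the (n_digits).toNat remaining iterations (= len(range(n_digits))).
def get_arithmetic (first : Int) (diff : Int) (n_digits : Int) : Option String :=
  get_arithmetic_go diff first "" n_digits.toNat

-- ===== PORT B =====
-- any(first + diff*i < 0 or first + diff*i > 9 for i in range(n_digits)): a short-circuiting
-- scan of the closed-form terms, ported as recursion on the remaining iterations.
def get_arithmetic_alt_any (first : Int) (diff : Int) (i : Int) : Nat → Bool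
  | 0 => false
  | m + 1 =>
      if first + diff * i < 0 ∨ first + diff * i > 9 then true
      else get_arithmetic_alt_any first diff (i + 1) m

def get_arithmetic_alt (first : Int) (diff : Int) (n_digits : Int) : Option String :=
  if get_arithmetic_alt_any first diff 0 n_digits.toNat then none
  else some (String.join (((PySem.List.pyRange 0 n_digits 1).map
    (fun i => first + diff * i)).map PySem.Int.toStr))

-- ===== PRECONDITION & SPEC =====
def Spec_get_arithmetic (first : Int) (diff : Int) (n_digits : Int) (out : Option String) : Prop := out = get_arithmetic_alt first diff n_digits
instance (first : Int) (diff : Int) (n_digits : Int) (out : Option String) : Decidable (Spec_get_arithmetic first diff n_digits out) := by unfold Spec_get_arithmetic; infer_instance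

-- ===== CLAIM (what is proved, stated in full; the proofs are below) =====
def Claim_equal_get_arithmetic : Prop := ∀ (first : Int) (diff : Int) (n_digits : Int), Dom_get_arithmetic first diff n_digits → Spec_get_arithmetic first diff n_digits (get_arithmetic first diff n_digits)

-- ===== LEMMAS AND PROOFS =====

-- B's short-circuit scan equals the any-over-the-term-list characterisation.
theorem get_arithmetic_alt_any_eq (first diff : Int) :
    ∀ (m : Nat) (i : Int),
      get_arithmetic_alt_any first diff i m =
        ((List.range m).map (fun k : Nat => first + diff * (i + (k : Int)))).any
          (fun t => decide (t < 0) || decide (t > 9)) := by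
  intro m
  induction m with
  | zero => intro i; simp [get_arithmetic_alt_any]
  | succ rest ih =>
      intro i
      simp only [get_arithmetic_alt_any, List.range_succ_eq_map, List.map_cons, List.map_map,
        List.any_cons]
      have harg : ((fun k : Nat => first + diff * (i + (k : Int))) ∘ Nat.succ) =
          (fun k : Nat => first + diff * ((i + 1) + (k : Int))) := by
        funext k
        simp only [Function.comp_apply, Nat.succ_eq_add_one]
        push_cast
        ring
      rw [ih (i + 1), harg]
      by_cases h : first + diff * i < 0 ∨ first + diff * i > 9
      · have hb : (decide (first + diff * (i + ((0:Nat) : Int)) < 0) ||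
            decide (first + diff * (i + ((0:Nat) : Int)) > 9)) = true := by
          rcases h with h | h <;> simp <;> omega
        rw [if_pos h, hb, Bool.true_or]
      · have hb : (decide (first + diff * (i + ((0:Nat) : Int)) < 0) ||
            decide (first + diff * (i + ((0:Nat) : Int)) > 9)) = false := by
          simp; omega
        rw [if_neg h, hb, Bool.false_or]

-- Appending to a string accumulator factors out of a foldl over string pieces.
theorem foldl_str_start {α : Type} (g : α → String) :
    ∀ (l : List α) (s : String),
      l.foldl (fun x y => x ++ g y) s = s ++ l.foldl (fun x y => x ++ g y) "" := by
  intro l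
  induction l with
  | nil => intro s; simp
  | cons x rest ih =>
      intro s
      simp only [List.foldl_cons]
      rw [ih (s ++ g x), ih ("" ++ g x)]
      simp [String.append_assoc]

-- A's accumulator loop over any index list equals B's build/validate/join on the closed-form terms.
theorem get_arithmetic_go_eq (diff : Int) :
    ∀ (m : Nat) (cur : Int) (acc : String),
      get_arithmetic_go diff cur acc m =
        (if ((List.range m).map (fun k : Nat => cur + diff * (k : Int))).any
              (fun t => decide (t < 0) || decide (t > 9)) then none
         else some (acc ++
           String.join (((List.range m).map (fun k : Nat => cur + diff * (k : Int))).map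
             PySem.Int.toStr))) := by
  intro m
  induction m with
  | zero => intro cur acc; simp [get_arithmetic_go, String.join]
  | succ rest ih =>
      intro cur acc
      simp only [get_arithmetic_go, List.range_succ_eq_map,
        List.map_cons, List.map_map, List.any_cons]
      have harg : ((fun k : Nat => cur + diff * (k : Int)) ∘ Nat.succ) =
          (fun k : Nat => (cur + diff) + diff * (k : Int)) := by
        funext k
        simp only [Function.comp_apply, Nat.succ_eq_add_one]
        push_cast
        ring
      by_cases h : cur < 0 ∨ cur > 9
      · have hb : (decide (cur + diff * ((0:Nat) : Int) < 0) || decide (cur + diff * ((0:Nat) : Int) > 9)) = true := by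
          rcases h with h | h <;> simp <;> omega
        rw [if_pos h, hb, Bool.true_or, if_pos rfl]
      · have hb : (decide (cur + diff * ((0:Nat) : Int) < 0) || decide (cur + diff * ((0:Nat) : Int) > 9)) = false := by
          simp; omega
        rw [if_neg h, ih (cur + diff) (acc ++ PySem.Int.toStr cur), hb, Bool.false_or, harg]
        by_cases h2 : (((List.range rest).map (fun k : Nat => (cur + diff) + diff * (k : Int))).any
            (fun t => decide (t < 0) || decide (t > 9))) = true
        · rw [if_pos h2, if_pos h2]
        · rw [if_neg h2, if_neg h2]
          simp only [String.join, List.map_map, List.foldl_map, List.foldl_cons, Option.some.injEq]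
          rw [foldl_str_start _ (List.range rest) ("" ++ PySem.Int.toStr (cur + diff * ((0:Nat):Int)))]
          simp [String.append_assoc]

theorem get_arithmetic_spec' (first diff n_digits : Int) :
    get_arithmetic first diff n_digits = get_arithmetic_alt first diff n_digits := by
  unfold get_arithmetic get_arithmetic_alt
  rw [get_arithmetic_go_eq, get_arithmetic_alt_any_eq, PySem.List.pyRange_one]
  simp only [Int.sub_zero, List.map_map, Function.comp_def, zero_add]
  simp [String.join]

-- ===== VERDICT (by name: the statement is the Claim_ definition above) =====
theorem get_arithmetic_spec : Claim_equal_get_arithmetic := by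
  intro first diff n_digits _
  exact get_arithmetic_spec' first diff n_digits
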